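-- pv_equiv track=rewrite | github.com/nuwandianusarani/HireGenius | Backend/app/cv_processing.py | extract_work_experience
-- ===== SOURCE A (Python) =====
-- def extract_work_experience(cv_text):
--     work_experience = []
--
--     work_experience_keywords = ['work experience', 'employment history', 'professional experience', 'job', 'company', 'position', 'role']
--
--     lines = cv_text.split('\n')
--     current_experience = None
--
--     for line in lines:
--         line_lower = line.lower().strip()
--
--         if any(keyword in line_lower for keyword in work_experience_keywords) and line:
--             if current_experience:
--                 work_experience.append(current_experience.strip())
--             current_experience = line.strip()
--         elif current_experience:
--             current_experience += " " + line.strip()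
--
--     if current_experience:
--         work_experience.append(current_experience.strip())
--
--     return work_experience
-- ===== SOURCE B (Python) =====
-- def extract_work_experience(cv_text):
--     keywords = ['work experience', 'employment history', 'professional experience', 'job', 'company', 'position', 'role']
--     lines = cv_text.split('\n')
--
--     def is_header(line):
--         return any(k in line.lower().strip() for k in keywords) and bool(line)
--
--     idxs = [i for i, l in enumerate(lines) if is_header(l)]
--     bounds = idxs[1:] + [len(lines)]
--     return [" ".join(l.strip() for l in lines[s:e]).strip()
--             for s, e in zip(idxs, bounds)]
-- ===== Notes on version B (the rewrite author's own statement) =====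
-- stated objective: alternative
-- what changed: A accumulates blocks statefully in one pass with a mutable current_experience string; B first computes the list of header line indices, then builds each block by slicing between consecutive header indices and joining the stripped lines.
import Mathlib
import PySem

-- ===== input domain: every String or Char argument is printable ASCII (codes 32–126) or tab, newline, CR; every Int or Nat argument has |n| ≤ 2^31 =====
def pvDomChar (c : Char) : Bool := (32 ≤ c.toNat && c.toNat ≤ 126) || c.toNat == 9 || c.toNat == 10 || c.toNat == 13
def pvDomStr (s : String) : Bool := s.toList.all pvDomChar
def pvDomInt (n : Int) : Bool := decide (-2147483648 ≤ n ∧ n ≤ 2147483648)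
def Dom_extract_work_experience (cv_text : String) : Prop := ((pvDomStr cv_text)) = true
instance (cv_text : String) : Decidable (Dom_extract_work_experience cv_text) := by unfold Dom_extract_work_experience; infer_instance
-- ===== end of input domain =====

-- B replaces A's stateful one-pass accumulation with: compute the header line indices, then slice
-- between consecutive headers and join the stripped lines (objective: alternative decomposition).

-- ===== PORT A =====
-- helpers shared by both ports (both Pythons use the identical keyword list, '\n' split and header test)
def pvKeywords : List String :=
  ["work experience", "employment history", "professional experience", "job", "company", "position", "role"]

-- `any(keyword in line.lower().strip() for keyword in work_experience_keywords) and line`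
def pvIsHeader (line : String) : Bool :=
  (pvKeywords.any (fun keyword => PySem.Str.isIn keyword (PySem.Str.strip (PySem.Str.lower line))))
    && !(line == "")

-- cv_text.split('\n'); split? returns none only for an empty separator, so the default is never taken
def pvLines (cv_text : String) : List String := (PySem.Str.split? cv_text "\n").getD []

-- `if current_experience: work_experience.append(current_experience.strip())`
-- (None and "" are both falsy in Python, hence the emptiness test)
def pvFlushA (acc : List String) (cur : Option String) : List String :=
  match cur with
  | some s => if s == "" then acc else acc ++ [PySem.Str.strip s]
  | none => acc

-- the body of A's `for line in lines:` loop, state = (work_experience, current_experience)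
def pvStepA (st : List String × Option String) (line : String) : List String × Option String :=
  if pvIsHeader line then
    (pvFlushA st.1 st.2, some (PySem.Str.strip line))
  else
    match st.2 with
    | some s => if s == "" then st else (st.1, some (s ++ " " ++ PySem.Str.strip line))
    | none => st

def extract_work_experience (cv_text : String) : List String :=
  let st := (pvLines cv_text).foldl pvStepA ([], (none : Option String))
  pvFlushA st.1 st.2

-- ===== PORT B =====
def extract_work_experience_alt (cv_text : String) : List String :=
  let lines := pvLines cv_text
  -- idxs = [i for i, l in enumerate(lines) if is_header(l)]
  let idxs : List Int := ((PySem.List.enumerate lines).filter (fun p => pvIsHeader p.2)).map (fun p => p.1)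
  -- bounds = idxs[1:] + [len(lines)]
  let bounds : List Int := idxs.drop 1 ++ [PySem.List.len lines]
  -- [" ".join(l.strip() for l in lines[s:e]).strip() for s, e in zip(idxs, bounds)]
  (idxs.zip bounds).map (fun p =>
    PySem.Str.strip (PySem.Str.join " "
      ((PySem.List.slice lines (some p.1) (some p.2)).map (fun l => PySem.Str.strip l))))

-- ===== PRECONDITION & SPEC =====
def Spec_extract_work_experience (cv_text : String) (out : List String) : Prop := out = extract_work_experience_alt cv_text
instance (cv_text : String) (out : List String) : Decidable (Spec_extract_work_experience cv_text out) := by unfold Spec_extract_work_experience; infer_instance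

-- ===== CLAIM (what is proved, stated in full; the proofs are below) =====
def Claim_equal_extract_work_experience : Prop := ∀ (cv_text : String), Dom_extract_work_experience cv_text → Spec_extract_work_experience cv_text (extract_work_experience cv_text)

-- ===== LEMMAS AND PROOFS =====

-- A's accumulated block: start from strip(header), then `+= " " + line.strip()` for each body line
def pvJoinAcc (s : String) (xs : List String) : String :=
  xs.foldl (fun a x => a ++ " " ++ PySem.Str.strip x) s

theorem pv_lowerChar_of_isspace (c : Char) (h : PySem.Chars.isspace c = true) :
    PySem.Chars.lowerChar c = c := by
  unfold PySem.Chars.lowerChar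
  split_ifs with hu
  · exfalso
    simp [PySem.Chars.isupper, Char.le_def, UInt32.le_iff_toNat_le] at hu
    simp [PySem.Chars.isspace] at h
    obtain ⟨h1, h2⟩ := hu
    have h1' : 65 ≤ c.toNat := by simpa using h1
    have h2' : c.toNat ≤ 90 := by simpa using h2
    omega
  · rfl

theorem pv_strip_eq_nil_iff (cs : List Char) :
    PySem.Chars.strip cs = [] ↔ ∀ c ∈ cs, PySem.Chars.isspace c = true := by
  unfold PySem.Chars.strip PySem.Chars.rstrip PySem.Chars.lstrip
  rw [List.reverse_eq_nil_iff, List.dropWhile_eq_nil_iff]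
  constructor
  · intro h c hc
    rw [← List.takeWhile_append_dropWhile (p := PySem.Chars.isspace) (l := cs)] at hc
    rcases List.mem_append.mp hc with h1 | h1
    · exact List.mem_takeWhile_imp h1
    · exact h c (List.mem_reverse.mpr h1)
  · intro h c hc
    refine h c ?_
    have hc' := List.mem_reverse.mp hc
    rw [← List.takeWhile_append_dropWhile (p := PySem.Chars.isspace) (l := cs)]
    exact List.mem_append_right _ hc'

theorem pv_header_strip_ne (l : String) (h : pvIsHeader l = true) :
    (PySem.Str.strip l == "") = false := by
  simp only [beq_eq_false_iff_ne, ne_eq]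
  intro hempty
  have hnil : PySem.Chars.strip l.toList = [] := by
    have := congrArg String.toList hempty
    simpa using this
  have hsp := (pv_strip_eq_nil_iff _).mp hnil
  have hlow : PySem.Chars.lower l.toList = l.toList := by
    simp only [PySem.Chars.lower]
    rw [List.map_congr_left (fun c hc => pv_lowerChar_of_isspace c (hsp c hc))]
    exact List.map_id _
  have hS : (PySem.Str.strip (PySem.Str.lower l)).toList = [] := by
    simp [hlow, hnil]
  simp [pvIsHeader, pvKeywords, hS] at h
  exact absurd h.1 (by decide)

theorem pv_append_ne_empty (s t : String) : ((s ++ " " ++ t) == "") = false := by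
  simp only [beq_eq_false_iff_ne, ne_eq]
  intro h
  have := congrArg String.toList h
  simp at this

theorem pv_intercalate_cons₂ {α : Type} (sep a b : List α) (t : List (List α)) :
    List.intercalate sep (a :: b :: t) = List.intercalate sep ((a ++ sep ++ b) :: t) := by
  cases t with
  | nil => simp [List.intercalate]
  | cons c t => simp [List.intercalate, List.append_assoc]

theorem pv_join_eq_joinAcc (xs : List String) (s : String) :
    PySem.Str.join " " (s :: xs.map (fun l => PySem.Str.strip l)) = pvJoinAcc s xs := by
  induction xs generalizing s with
  | nil =>
    show PySem.Str.join " " [s] = s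
    simp [PySem.Str.join, PySem.Chars.join, List.intercalate, String.ofList_toList]
  | cons x xs ih =>
    have step : PySem.Str.join " " (s :: ((x :: xs).map (fun l => PySem.Str.strip l)))
        = PySem.Str.join " " ((s ++ " " ++ PySem.Str.strip x) :: xs.map (fun l => PySem.Str.strip l)) := by
      simp only [List.map_cons, PySem.Str.join]
      congr 1
      simp only [String.toList_append]
      rw [PySem.Chars.join, PySem.Chars.join, pv_intercalate_cons₂]
    rw [step, ih]
    rfl

def pvSpecGo : List String → List String
  | [] => []
  | l :: ls =>
    if pvIsHeader l then
      PySem.Str.strip (pvJoinAcc (PySem.Str.strip l) (ls.takeWhile (fun x => !pvIsHeader x)))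
        :: pvSpecGo (ls.dropWhile (fun x => !pvIsHeader x))
    else pvSpecGo ls
  termination_by ls => ls.length
  decreasing_by
    · exact Nat.lt_succ_of_le (List.length_dropWhile_le _ _)
    · exact Nat.lt_succ_self _

theorem pv_foldA_some (ls : List String) (acc : List String) (s : String) (hs : (s == "") = false) :
    (fun st => pvFlushA st.1 st.2) (ls.foldl pvStepA (acc, some s))
      = acc ++ PySem.Str.strip (pvJoinAcc s (ls.takeWhile (fun x => !pvIsHeader x)))
          :: pvSpecGo (ls.dropWhile (fun x => !pvIsHeader x)) := by
  induction ls generalizing acc s with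
  | nil => simp [pvFlushA, hs, pvJoinAcc, pvSpecGo]
  | cons l ls ih =>
    rw [List.foldl_cons]
    by_cases hl : pvIsHeader l = true
    · have hstep : pvStepA (acc, some s) l = (acc ++ [PySem.Str.strip s], some (PySem.Str.strip l)) := by
        simp [pvStepA, hl, pvFlushA, hs]
      rw [hstep, ih _ _ (pv_header_strip_ne l hl)]
      simp [hl, pvJoinAcc, pvSpecGo]
    · have hstep : pvStepA (acc, some s) l = (acc, some (s ++ " " ++ PySem.Str.strip l)) := by
        simp [pvStepA, hl, hs]
      rw [hstep, ih _ _ (pv_append_ne_empty _ _)]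
      simp [hl]
      rfl

theorem pv_foldA_none (ls : List String) (acc : List String) :
    (fun st => pvFlushA st.1 st.2) (ls.foldl pvStepA (acc, none))
      = acc ++ pvSpecGo ls := by
  induction ls generalizing acc with
  | nil => simp [pvFlushA, pvSpecGo]
  | cons l ls ih =>
    rw [List.foldl_cons]
    by_cases hl : pvIsHeader l = true
    · have hstep : pvStepA (acc, none) l = (acc, some (PySem.Str.strip l)) := by
        simp [pvStepA, hl, pvFlushA]
      rw [hstep, pv_foldA_some _ _ _ (pv_header_strip_ne l hl)]
      simp [pvSpecGo, hl]
    · have hstep : pvStepA (acc, none) l = (acc, none) := by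
        simp [pvStepA, hl]
      rw [hstep, ih]
      simp [pvSpecGo, hl]

def pvIdxs (ls : List String) (s : Int) : List Int :=
  ((PySem.List.enumerate ls s).filter (fun p => pvIsHeader p.2)).map (fun p => p.1)

def pvBlocks (full : List String) (idxs : List Int) : List String :=
  (idxs.zip (idxs.drop 1 ++ [PySem.List.len full])).map (fun p =>
    PySem.Str.strip (PySem.Str.join " "
      ((PySem.List.slice full (some p.1) (some p.2)).map (fun l => PySem.Str.strip l))))

theorem pvIdxs_nil (s : Int) : pvIdxs [] s = [] := rfl

theorem pvIdxs_cons (l : String) (ls : List String) (s : Int) :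
    pvIdxs (l :: ls) s = (if pvIsHeader l then [s] else []) ++ pvIdxs ls (s + 1) := by
  have he : PySem.List.enumerate (l :: ls) s = (s, l) :: PySem.List.enumerate ls (s + 1) := rfl
  by_cases hl : pvIsHeader l = true <;>
    simp [pvIdxs, he, hl]

theorem pvIdxs_skip (tw dw : List String) (s : Int)
    (h : ∀ x ∈ tw, pvIsHeader x = false) :
    pvIdxs (tw ++ dw) s = pvIdxs dw (s + tw.length) := by
  induction tw generalizing s with
  | nil => simp only [List.nil_append, List.length_nil, Nat.cast_zero, add_zero]
  | cons a tw ih =>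
    rw [List.cons_append, pvIdxs_cons, h a (by simp)]
    rw [ih _ (fun x hx => h x (by simp [hx]))]
    simp only [Bool.false_eq_true, if_false, List.nil_append]
    congr 1
    simp only [List.length_cons]
    push_cast
    omega

theorem pvBlocks_cons₂ (full : List String) (a b : Int) (t : List Int) :
    pvBlocks full (a :: b :: t)
      = PySem.Str.strip (PySem.Str.join " "
          ((PySem.List.slice full (some a) (some b)).map (fun l => PySem.Str.strip l)))
        :: pvBlocks full (b :: t) := by
  simp [pvBlocks]

theorem pv_slice_head (full : List String) (o k : Nat) (l : String) (ls' : List String)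
    (hdrop : full.drop o = l :: ls') (hk : o + 1 + k ≤ full.length) :
    PySem.List.slice full (some (o : Int)) (some ((o : Int) + 1 + (k : Int))) = l :: ls'.take k := by
  have ho : o < full.length := by
    by_contra hcon
    have : full.drop o = [] := List.drop_eq_nil_of_le (by omega)
    rw [hdrop] at this; simp at this
  rw [PySem.List.slice_of_nonneg full (by positivity) (by positivity) (by exact_mod_cast le_of_lt ho) (by exact_mod_cast hk)]
  have h1 : ((o : Int) + 1 + (k : Int)).toNat = o + 1 + k := by omega
  have h2 : ((o : Int)).toNat = o := by omega
  rw [h1, h2, hdrop]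
  have : o + 1 + k - o = k + 1 := by omega
  rw [this, List.take_succ_cons]

set_option maxHeartbeats 1000000 in
theorem pv_blocks_eq_specGo (n : Nat) (ls full : List String) (o : Nat)
    (hn : ls.length = n) (hdrop : full.drop o = ls) :
    pvBlocks full (pvIdxs ls o) = pvSpecGo ls := by
  induction n using Nat.strong_induction_on generalizing ls full o with
  | _ n IH =>
  cases ls with
  | nil => simp [pvIdxs_nil, pvBlocks, pvSpecGo]
  | cons l ls' =>
    have ho : o < full.length := by
      by_contra hcon
      have : full.drop o = [] := List.drop_eq_nil_of_le (by omega)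
      rw [hdrop] at this; simp at this
    have hdrop1 : full.drop (o + 1) = ls' := by
      rw [← List.tail_drop, hdrop]
      rfl
    have hlen1 : full.length = o + 1 + ls'.length := by
      have := congrArg List.length hdrop1
      simp [List.length_drop] at this
      omega
    by_cases hl : pvIsHeader l = true
    · -- header line
      have hsplit : ls'.takeWhile (fun x => !pvIsHeader x) ++ ls'.dropWhile (fun x => !pvIsHeader x) = ls' :=
        List.takeWhile_append_dropWhile
      set tw := ls'.takeWhile (fun x => !pvIsHeader x) with htw_def
      set dw := ls'.dropWhile (fun x => !pvIsHeader x) with hdw_def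
      have htw : ∀ x ∈ tw, pvIsHeader x = false := by
        intro x hx
        have := List.mem_takeWhile_imp hx
        simpa using this
      have hlen2 : tw.length + dw.length = ls'.length := by
        have := congrArg List.length hsplit
        simpa using this
      have hIdx : pvIdxs (l :: ls') o = (o : Int) :: pvIdxs dw ((o : Int) + 1 + tw.length) := by
        rw [pvIdxs_cons, if_pos hl]
        rw [← hsplit, pvIdxs_skip tw dw _ htw]
        simp only [List.cons_append, List.nil_append]
      have hspec : pvSpecGo (l :: ls') = PySem.Str.strip (pvJoinAcc (PySem.Str.strip l) tw) :: pvSpecGo dw := by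
        rw [pvSpecGo, if_pos hl]
      cases hdw : dw with
      | nil =>
        have htweq : tw = ls' := by rw [← hsplit, hdw, List.append_nil]
        rw [hIdx, hdw, pvIdxs_nil]
        have hslice : PySem.List.slice full (some (o : Int)) (some (PySem.List.len full)) = l :: tw := by
          have hlf : PySem.List.len full = ((o : Int) + 1 + (ls'.length : Int)) := by
            rw [PySem.List.len_eq, hlen1]; push_cast; ring
          rw [hlf, pv_slice_head full o ls'.length l ls' hdrop (by omega), htweq,
            List.take_of_length_le (le_refl _)]
        show pvBlocks full [(o : Int)] = pvSpecGo (l :: ls')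
        have hnilgo : pvSpecGo ([] : List String) = [] := by rw [pvSpecGo]
        rw [hspec, hdw, hnilgo]
        simp only [pvBlocks, List.drop_one, List.tail_cons, List.nil_append, List.zip_cons_cons,
          List.zip_nil_right, List.map_cons, List.map_nil]
        rw [hslice]
        simp only [List.map_cons]
        rw [pv_join_eq_joinAcc]
      | cons m ms =>
        have hdwls : ls'.dropWhile (fun x => !pvIsHeader x) = m :: ms := by rw [← hdw_def]; exact hdw
        have hm : pvIsHeader m = true := by
          have hne : ls'.dropWhile (fun x => !pvIsHeader x) ≠ [] := by rw [hdwls]; simp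
          have hh := List.head_dropWhile_not (fun x => !pvIsHeader x) hne
          simp only [hdwls, List.head_cons] at hh
          simpa using hh
        have hIdx2 : pvIdxs dw ((o : Int) + 1 + tw.length)
            = ((o : Int) + 1 + tw.length) :: pvIdxs ms ((o : Int) + 1 + tw.length + 1) := by
          rw [hdw, pvIdxs_cons, if_pos hm]
          simp only [List.singleton_append]
        rw [hIdx, hIdx2, pvBlocks_cons₂]
        have hslice : PySem.List.slice full (some (o : Int)) (some ((o : Int) + 1 + (tw.length : Int))) = l :: tw := by
          rw [pv_slice_head full o tw.length l ls' hdrop (by omega)]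
          rw [← hsplit, List.take_left]
        have hdropdw : full.drop (o + 1 + tw.length) = dw := by
          have h1 : full.drop (o + 1 + tw.length) = (full.drop (o + 1)).drop tw.length := by
            rw [List.drop_drop]
          rw [h1, hdrop1, ← hsplit, List.drop_left]
        have htail : pvBlocks full (((o : Int) + 1 + tw.length) :: pvIdxs ms ((o : Int) + 1 + tw.length + 1))
            = pvSpecGo dw := by
          have hcast : ((o + 1 + tw.length : Nat) : Int) = (o : Int) + 1 + tw.length := by push_cast; ring
          have := IH dw.length (by simp only [List.length_cons] at hn; omega) dw full (o + 1 + tw.length) rfl hdropdw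
          rw [hcast] at this
          rw [← this, hdw, pvIdxs_cons, if_pos hm]
          simp only [List.singleton_append]
        rw [htail, hspec, hslice]
        simp only [List.map_cons]
        rw [pv_join_eq_joinAcc]
    · rw [pvIdxs_cons, if_neg hl]
      simp only [List.nil_append]
      have hcast : (o : Int) + 1 = ((o + 1 : Nat) : Int) := by push_cast; ring
      rw [hcast, IH ls'.length (by simp at hn; omega) ls' full (o + 1) rfl hdrop1]
      rw [pvSpecGo, if_neg hl]

-- ===== VERDICT (by name: the statement is the Claim_ definition above) =====
theorem extract_work_experience_spec : Claim_equal_extract_work_experience := by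
  intro cv_text _
  unfold Spec_extract_work_experience
  have hA : extract_work_experience cv_text = pvSpecGo (pvLines cv_text) := by
    have := pv_foldA_none (pvLines cv_text) []
    simpa [extract_work_experience] using this
  have hB : extract_work_experience_alt cv_text = pvSpecGo (pvLines cv_text) := by
    have h := pv_blocks_eq_specGo (pvLines cv_text).length (pvLines cv_text) (pvLines cv_text) 0 rfl rfl
    simpa [extract_work_experience_alt, pvBlocks, pvIdxs] using h
  rw [hA, hB]
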